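-- pv_equiv track=rewrite | github.com/YinyanBu/ECE143 | word_processing.py | get_most_common_end
-- ===== SOURCE A (Python) =====
-- def get_most_common_end(words):
--     '''
--     get the most common ending letter.
--     input:words
--     input type:list
--     output:string
--
--     '''
--     assert isinstance(words,list)
--     for i in words:
--         assert isinstance(i,str)
--     assert len(words)!=0
--
--     common_list=dict()
--     for i in words:
--         if i[-1] not in common_list.keys():
--             common_list[i[-1]]=1
--         else:
--             common_list[i[-1]]=common_list[i[-1]]+1
--     most_common=''
--     most=0
--     for j in common_list.keys():
--         if common_list[j]>most:
--             most=common_list[j]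
--             most_common=j
--     return most_common
-- ===== SOURCE B (Python) =====
-- def get_most_common_end(words):
--     '''
--     get the most common ending letter.
--     input:words
--     input type:list
--     output:string
--
--     '''
--     assert isinstance(words,list)
--     for i in words:
--         assert isinstance(i,str)
--     assert len(words)!=0
--
--     seen=[]
--     for w in words:
--         if w[-1] not in seen:
--             seen.append(w[-1])
--     most_common=''
--     most=0
--     for c in seen:
--         cnt=sum(1 for w in words if w[-1]==c)
--         if cnt>most:
--             most=cnt
--             most_common=c
--     return most_common
-- ===== Notes on version B (the rewrite author's own statement) =====
-- stated objective: alternative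
-- what changed: Replaces the frequency dictionary with an ordered list of distinct last letters built by first appearance, then counts each candidate by a fresh full scan of the words while tracking the running maximum with strict >, preserving the first-appearance tie-break.
import Mathlib
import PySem

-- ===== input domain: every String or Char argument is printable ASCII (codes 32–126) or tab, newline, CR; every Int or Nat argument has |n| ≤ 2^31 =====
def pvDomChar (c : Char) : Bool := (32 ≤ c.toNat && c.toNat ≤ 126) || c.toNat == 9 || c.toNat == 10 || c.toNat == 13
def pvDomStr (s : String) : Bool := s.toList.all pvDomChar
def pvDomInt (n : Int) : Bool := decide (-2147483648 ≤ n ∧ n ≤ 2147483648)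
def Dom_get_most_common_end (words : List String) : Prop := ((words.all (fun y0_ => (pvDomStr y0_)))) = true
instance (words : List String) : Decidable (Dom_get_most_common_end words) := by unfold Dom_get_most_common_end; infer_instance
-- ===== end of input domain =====

-- B replaces A's frequency dictionary with an ordered first-appearance list of distinct
-- last letters and counts each candidate by a fresh full scan (alternative decomposition).


-- ===== PORT A =====
-- w[-1]; Pre_ guarantees nonempty words, so the default is never taken on admitted inputs
def pvLast (w : String) : Char := (PySem.Str.pyGet? w (-1)).getD ' '

def get_most_common_end (words : List String) : String :=
  let common_list : PySem.Dict Char Int :=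
    words.foldl (fun d i =>
      if ¬ d.contains (pvLast i) then d.insert (pvLast i) 1
      else d.insert (pvLast i) (d.getD (pvLast i) 0 + 1)) PySem.Dict.empty
  let r :=
    common_list.keys.foldl (fun (st : String × Int) j =>
      if common_list.getD j 0 > st.2 then (String.ofList [j], common_list.getD j 0) else st)
      ("", 0)
  r.1

-- ===== PORT B =====
def get_most_common_end_alt (words : List String) : String :=
  let seen : PySem.Set Char :=
    words.foldl (fun s w => PySem.Set.add s (pvLast w)) PySem.Set.empty
  let r :=
    seen.foldl (fun (st : String × Int) c =>
      let cnt : Int := words.foldl (fun acc w => if pvLast w == c then acc + 1 else acc) 0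
      if cnt > st.2 then (String.ofList [c], cnt) else st)
      ("", 0)
  r.1

-- ===== PRECONDITION & SPEC =====
-- Pre_ excludes exactly the inputs where the Python A raises: the empty list (assert) and
-- any empty word (IndexError on w[-1]); B raises there too.
def Pre_get_most_common_end (words : List String) : Prop :=
  words ≠ [] ∧ ∀ w ∈ words, w ≠ ""
instance (words : List String) : Decidable (Pre_get_most_common_end words) := by
  unfold Pre_get_most_common_end; infer_instance

def pvWitness_get_most_common_end : List String := (["ab", "cb", "d"])

def Spec_get_most_common_end (words : List String) (out : String) : Prop := out = get_most_common_end_alt words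
instance (words : List String) (out : String) : Decidable (Spec_get_most_common_end words out) := by unfold Spec_get_most_common_end; infer_instance

-- ===== CLAIM (what is proved, stated in full; the proofs are below) =====
def Claim_equal_get_most_common_end : Prop := ∀ (words : List String), Dom_get_most_common_end words → Pre_get_most_common_end words → Spec_get_most_common_end words (get_most_common_end words)

-- ===== LEMMAS AND PROOFS =====

-- A's counting loop builds exactly Counter(map pvLast words)
lemma dictA_eq_counter (words : List String) :
    words.foldl (fun d i =>
      if ¬ d.contains (pvLast i) then d.insert (pvLast i) 1
      else d.insert (pvLast i) (d.getD (pvLast i) 0 + 1)) PySem.Dict.empty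
    = PySem.Dict.counter (words.map pvLast) := by
  rw [← PySem.Dict.foldl_insert_getD_add_one_eq_counter, List.foldl_map]
  apply List.foldl_ext
  intro d w _
  by_cases h : d.contains (pvLast w)
  · simp [h]
  · simp only [Bool.not_eq_true] at h
    simp [h, PySem.Dict.getD_of_not_contains d 0 h]

-- B's seen list is Set.ofList of the same key list
lemma seenB_eq_ofList (words : List String) :
    words.foldl (fun s w => PySem.Set.add s (pvLast w)) PySem.Set.empty
    = PySem.Set.ofList (words.map pvLast) := by
  rw [PySem.Set.ofList, List.foldl_map]

-- ===== VERDICT (by name: the statement is the Claim_ definition above) =====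
theorem get_most_common_end_spec : Claim_equal_get_most_common_end := by
  intro words _ _
  unfold Spec_get_most_common_end get_most_common_end get_most_common_end_alt
  simp only [dictA_eq_counter, seenB_eq_ofList]
  rw [PySem.Dict.keys_counter]
  congr 1
  apply List.foldl_ext
  intro st c _
  have hc : (words.foldl (fun acc w => if pvLast w == c then acc + 1 else acc) 0 : Int)
      = ((words.map pvLast).count c : Int) := by
    rw [← List.foldl_map (f := pvLast)
      (g := fun acc x => if x == c then acc + 1 else acc)]
    rw [PySem.List.foldl_count_if (fun x => x == c) (words.map pvLast) 0]
    simp [List.count]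
  rw [PySem.Dict.getD_counter, ← hc]
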